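-- pv_equiv track=rewrite | github.com/InternLM/InternLM | internlm/solver/pipeline_utils.py | partition_uniform
-- ===== SOURCE A (Python) =====
-- def partition_uniform(num_items, pipeline_parallel_size, num_chunks):
--     assert (
--         num_items % num_chunks == 0
--     ), "Layer length should be divided by the number of chunks, otherwise parameter method is recomended"
--
--     parts = [[] for _ in range(pipeline_parallel_size)]
--     partition_items = num_items // num_chunks
--     for idx in range(num_chunks):
--         base_idx = idx * partition_items
--         chunk_size = partition_items // pipeline_parallel_size
--         left = pipeline_parallel_size - partition_items % pipeline_parallel_size
--         if chunk_size == 0: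
--             raise ValueError("Some nodes in Pipeline have no requests")
--
--         for p in range(pipeline_parallel_size):
--             st = base_idx
--             base_idx += chunk_size + (p >= left)
--             parts[p].append((st, base_idx))
--
--     indexes = []
--     for _parts in parts:
--         for s, e in _parts:
--             indexes.extend(list(range(s, e)))
--     assert len(indexes) == len(set(indexes)), indexes  # should have no duplicates
--     assert set(indexes) == set(list(range(num_items))), (indexes, num_items)  # should have the same indexes as expected
--     return parts
-- ===== SOURCE B (Python) =====
-- def partition_uniform(num_items, pipeline_parallel_size, num_chunks):
--     assert (
--         num_items % num_chunks == 0
--     ), "Layer length should be divided by the number of chunks, otherwise parameter method is recomended"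
--
--     partition_items = num_items // num_chunks
--     chunk_size = partition_items // pipeline_parallel_size
--     if chunk_size == 0:
--         raise ValueError("Some nodes in Pipeline have no requests")
--     left = pipeline_parallel_size - partition_items % pipeline_parallel_size
--
--     def bound(idx, p):
--         return idx * partition_items + p * chunk_size + max(0, p - left)
--
--     return [[(bound(idx, p), bound(idx, p + 1)) for idx in range(num_chunks)]
--             for p in range(pipeline_parallel_size)]
-- ===== Notes on version B (the rewrite author's own statement) =====
-- stated objective: simpler
-- what changed: The mutated base_idx accumulator threaded through nested loops is replaced by a closed-form per-stage offset bound(idx, p) = idx*partition_items + p*chunk_size + max(0, p-left), so the result is built directly by two nested comprehensions with no mutable state and no parts[p].append.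
-- outside the precondition, e.g. on partition_uniform(0, 2, -1): A returns [[], []], B raises ValueError; on partition_uniform(0, 0, -1): A returns [], B raises ZeroDivisionError
import Mathlib
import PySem

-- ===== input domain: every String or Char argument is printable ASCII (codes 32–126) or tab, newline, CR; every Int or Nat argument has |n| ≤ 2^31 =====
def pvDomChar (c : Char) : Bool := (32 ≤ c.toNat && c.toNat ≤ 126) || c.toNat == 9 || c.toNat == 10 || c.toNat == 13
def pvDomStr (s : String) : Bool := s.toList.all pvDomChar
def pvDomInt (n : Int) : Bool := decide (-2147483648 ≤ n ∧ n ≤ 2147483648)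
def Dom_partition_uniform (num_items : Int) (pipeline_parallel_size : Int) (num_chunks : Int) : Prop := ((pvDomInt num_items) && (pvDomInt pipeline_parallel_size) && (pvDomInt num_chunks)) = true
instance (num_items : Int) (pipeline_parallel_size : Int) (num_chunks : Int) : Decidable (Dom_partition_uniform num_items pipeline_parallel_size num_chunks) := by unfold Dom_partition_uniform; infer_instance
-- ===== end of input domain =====

-- B replaces A's mutated base_idx accumulator with a closed-form per-stage offset
-- bound(idx, p) and builds the result by two nested comprehensions (objective: simpler).

-- ===== PORT A =====
-- literal transliteration of A: parts = list of pps empty lists; outer loop over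
-- chunks, inner loop over stages threading (parts, base_idx); parts[p].append
-- becomes List.modify at p.toNat (every p produced by range(pps) is ≥ 0, so toNat
-- is exact here); A's asserts/raise have no in-Pre_ effect and are excluded by Pre_.
def partition_uniform (num_items : Int) (pipeline_parallel_size : Int) (num_chunks : Int) : List (List (Int × Int)) :=
  let parts0 : List (List (Int × Int)) :=
    (PySem.List.pyRange 0 pipeline_parallel_size 1).map (fun _ => [])
  let partition_items := PySem.Int.floordiv num_items num_chunks
  (PySem.List.pyRange 0 num_chunks 1).foldl
    (fun parts idx =>
      let chunk_size := PySem.Int.floordiv partition_items pipeline_parallel_size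
      let left := pipeline_parallel_size - PySem.Int.mod partition_items pipeline_parallel_size
      ((PySem.List.pyRange 0 pipeline_parallel_size 1).foldl
        (fun (st : List (List (Int × Int)) × Int) p =>
          let stv := st.2
          let base := st.2 + chunk_size + (if p ≥ left then (1 : Int) else 0)
          (st.1.modify p.toNat (fun l => l ++ [(stv, base)]), base))
        (parts, idx * partition_items)).1)
    parts0

-- ===== PORT B =====
-- transliteration of Source B: the helper bound(idx, p) and two nested comprehensions.
def pvBound (partition_items chunk_size left idx p : Int) : Int :=
  idx * partition_items + p * chunk_size + max 0 (p - left)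

def partition_uniform_alt (num_items : Int) (pipeline_parallel_size : Int) (num_chunks : Int) : List (List (Int × Int)) :=
  let partition_items := PySem.Int.floordiv num_items num_chunks
  let chunk_size := PySem.Int.floordiv partition_items pipeline_parallel_size
  let left := pipeline_parallel_size - PySem.Int.mod partition_items pipeline_parallel_size
  (PySem.List.pyRange 0 pipeline_parallel_size 1).map (fun p =>
    (PySem.List.pyRange 0 num_chunks 1).map (fun idx =>
      (pvBound partition_items chunk_size left idx p,
       pvBound partition_items chunk_size left idx (p + 1))))

-- ===== PRECONDITION & SPEC =====
-- Pre_ excludes the inputs on which A raises (num_chunks = 0 or num_items not a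
-- multiple of it: AssertionError/ZeroDivisionError; with a positive num_chunks,
-- pipeline_parallel_size = 0 or chunk_size = 0: ZeroDivisionError/ValueError, and
-- positive num_items with negative pipeline_parallel_size: final AssertionError),
-- and the negative-num_chunks inputs whose pipeline_parallel_size or chunk_size is 0,
-- on which A's vacuous loops accidentally return empty partition lists while B's
-- closed form raises ZeroDivisionError/ValueError there.
def Pre_partition_uniform (num_items : Int) (pipeline_parallel_size : Int) (num_chunks : Int) : Prop :=
  num_chunks ≠ 0 ∧ pipeline_parallel_size ≠ 0 ∧
  PySem.Int.mod num_items num_chunks = 0 ∧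
  PySem.Int.floordiv (PySem.Int.floordiv num_items num_chunks) pipeline_parallel_size ≠ 0 ∧
  ((0 < num_chunks ∧ 0 < pipeline_parallel_size) ∨ num_items ≤ 0)

instance (num_items : Int) (pipeline_parallel_size : Int) (num_chunks : Int) : Decidable (Pre_partition_uniform num_items pipeline_parallel_size num_chunks) := by unfold Pre_partition_uniform; infer_instance

def pvWitness_partition_uniform : Int × Int × Int := (8, 2, 2)

def Spec_partition_uniform (num_items : Int) (pipeline_parallel_size : Int) (num_chunks : Int) (out : List (List (Int × Int))) : Prop := out = partition_uniform_alt num_items pipeline_parallel_size num_chunks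
instance (num_items : Int) (pipeline_parallel_size : Int) (num_chunks : Int) (out : List (List (Int × Int))) : Decidable (Spec_partition_uniform num_items pipeline_parallel_size num_chunks out) := by unfold Spec_partition_uniform; infer_instance

-- ===== CLAIM (what is proved, stated in full; the proofs are below) =====
def Claim_equal_partition_uniform : Prop := ∀ (num_items : Int) (pipeline_parallel_size : Int) (num_chunks : Int), Dom_partition_uniform num_items pipeline_parallel_size num_chunks → Pre_partition_uniform num_items pipeline_parallel_size num_chunks → Spec_partition_uniform num_items pipeline_parallel_size num_chunks (partition_uniform num_items pipeline_parallel_size num_chunks)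

-- ===== LEMMAS AND PROOFS =====

-- max 0 (p - left) accumulates A's per-stage `(p >= left)` increments.
theorem pvMax_step (p left : Int) :
    max 0 (p + 1 - left) = max 0 (p - left) + (if p ≥ left then (1 : Int) else 0) := by
  split_ifs with h <;> omega

-- A's inner stage loop in closed form: each parts[p] (p < k) gains the pair
-- (B0 + p·cs + max 0 (p-left), B0 + (p+1)·cs + max 0 (p+1-left)), and base_idx
-- ends at the k-th bound.
theorem pvInner (cs left B0 : Int) (hl : 0 ≤ left) (k : Nat)
    (parts : List (List (Int × Int))) :
    ((List.range k).foldl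
      (fun (st : List (List (Int × Int)) × Int) (p : Nat) =>
        (st.1.modify ((p : Int)).toNat
          (fun l => l ++ [(st.2, st.2 + cs + (if (p : Int) ≥ left then (1 : Int) else 0))]),
         st.2 + cs + (if (p : Int) ≥ left then (1 : Int) else 0)))
      (parts, B0))
    = (parts.mapIdx (fun p l =>
        if p < k then l ++ [(B0 + p * cs + max 0 ((p : Int) - left),
                            B0 + (p + 1) * cs + max 0 ((p : Int) + 1 - left))] else l),
       B0 + k * cs + max 0 ((k : Int) - left)) := by
  induction k with
  | zero =>
      refine Prod.ext ?_ ?_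
      · apply List.ext_getElem <;> simp
      · simp; omega
  | succ k ih =>
      rw [List.range_succ, List.foldl_append, ih]
      simp only [List.foldl_cons, List.foldl_nil, Int.toNat_natCast]
      refine Prod.ext ?_ ?_
      · apply List.ext_getElem
        · simp
        · intro i h1 h2
          simp only [List.getElem_modify, List.getElem_mapIdx]
          rcases lt_trichotomy i k with h | h | h
          · simp [h, Nat.lt_succ_of_lt h, Nat.ne_of_gt h]
          · subst h
            simp only [Nat.lt_succ_self, lt_irrefl, if_false, if_true]
            have he : B0 + (i : Int) * cs + max 0 ((i : Int) - left) + cs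
                + (if (i : Int) ≥ left then (1 : Int) else 0)
                = B0 + ((i : Int) + 1) * cs + max 0 ((i : Int) + 1 - left) := by
              rw [pvMax_step]; ring
            simp only [he]
          · have hx : ¬ i < k := by omega
            have hy : ¬ i < k + 1 := by omega
            simp [hx, hy, Nat.ne_of_lt h]
      · push_cast
        rw [pvMax_step]
        ring

-- one row of B's result: the pairs the stage p receives, one per chunk.
def pvRow (pi cs left : Int) (m : Nat) (p : Int) : List (Int × Int) :=
  (List.range m).map (fun (idx : Nat) => (pvBound pi cs left ((idx : Nat) : Int) p,
                                          pvBound pi cs left ((idx : Nat) : Int) (p + 1)))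

-- appending one pair to every row of an n-row table, pointwise.
theorem pvRowExt (n : Nat) (f : Nat → List (Int × Int)) (g : Nat → Int × Int) :
    (List.mapIdx (fun p l => if p < n then l ++ [g p] else l)
       ((List.range n).map f))
    = (List.range n).map (fun p => f p ++ [g p]) := by
  apply List.ext_getElem
  · simp
  · intro i h1 h2
    simp only [List.getElem_mapIdx, List.getElem_map, List.getElem_range]
    simp at h2
    simp [h2]

-- A's whole chunk loop in closed form: the table of rows pvRow.
theorem pvOuter (pi cs left : Int) (hl : 0 ≤ left) (n m : Nat) :
    ((List.range m).foldl
      (fun (parts : List (List (Int × Int))) (idx : Nat) =>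
        (((List.range n).foldl
          (fun (st : List (List (Int × Int)) × Int) (p : Nat) =>
            (st.1.modify ((p : Int)).toNat
              (fun l => l ++ [(st.2, st.2 + cs + (if (p : Int) ≥ left then (1 : Int) else 0))]),
             st.2 + cs + (if (p : Int) ≥ left then (1 : Int) else 0)))
          (parts, (idx : Int) * pi)).1))
      ((List.range n).map (fun _ => ([] : List (Int × Int)))))
    = (List.range n).map (fun (p : Nat) => pvRow pi cs left m ((p : Nat) : Int)) := by
  induction m with
  | zero => simp [pvRow]
  | succ m ih =>
      rw [List.range_succ, List.foldl_append, ih, List.foldl_cons, List.foldl_nil,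
        pvInner cs left ((m : Int) * pi) hl n]
      rw [pvRowExt n (fun (p : Nat) => pvRow pi cs left m ((p : Nat) : Int))
        (fun p => ((m : Int) * pi + p * cs + max 0 ((p : Int) - left),
                   (m : Int) * pi + ((p : Int) + 1) * cs + max 0 ((p : Int) + 1 - left)))]
      apply List.map_congr_left
      intro p hp
      simp only [pvRow, List.range_succ]
      simp [pvBound]

-- the main (positive-sizes) case: both ports compute the same table of rows.
theorem pvMain (ni pp nc : Int) (h1 : 0 < nc) (h2 : 0 < pp) :
    partition_uniform ni pp nc = partition_uniform_alt ni pp nc := by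
  obtain ⟨n, rfl⟩ : ∃ n : Nat, pp = (n : Int) := ⟨pp.toNat, (Int.toNat_of_nonneg h2.le).symm⟩
  obtain ⟨m, rfl⟩ : ∃ m : Nat, nc = (m : Int) := ⟨nc.toNat, (Int.toNat_of_nonneg h1.le).symm⟩
  have hl : 0 ≤ (n : Int) - PySem.Int.mod (PySem.Int.floordiv ni (m : Int)) (n : Int) := by
    have := PySem.Int.mod_lt (PySem.Int.floordiv ni (m : Int)) h2
    omega
  simp only [partition_uniform, partition_uniform_alt, PySem.List.pyRange_zero_natCast,
    List.foldl_map, List.map_map]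
  simp only [Function.comp_def]
  rw [pvOuter _ _ _ hl n m]
  simp [pvRow]

-- ===== VERDICT (by name: the statement is the Claim_ definition above) =====
theorem partition_uniform_spec : Claim_equal_partition_uniform := by
  intro ni pp nc _dom hpre
  obtain ⟨hnc, hpp, h3, h4, h5⟩ := hpre
  unfold Spec_partition_uniform
  rcases h5 with ⟨hncpos, hpppos⟩ | hni
  · exact pvMain ni pp nc hncpos hpppos
  · rcases lt_or_gt_of_ne hnc with hneg | hpos
    · simp [partition_uniform, partition_uniform_alt, PySem.List.pyRange_one_eq_nil hneg.le]
    · rcases lt_or_gt_of_ne hpp with hppneg | hpppos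
      · simp [partition_uniform, partition_uniform_alt,
          PySem.List.pyRange_one_eq_nil hppneg.le, List.foldl_fixed]
      · exact pvMain ni pp nc hpos hpppos
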